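-- pv_equiv track=rewrite | github.com/llueg/parapint | parapint/interfaces/distributed_regularization/mpi_sc_ip_interface.py | _get_ownership_map
-- ===== SOURCE A (Python) =====
-- from typing import Dict, Optional, Sequence
--
-- def _get_ownership_map(num_blocks: int, size: int) -> Dict[int, int]:
--     ownership_map = dict()
--     for ndx in range(num_blocks):
--         for rank in range(size):
--             if ndx % size == rank:
--                 ownership_map[ndx] = rank
--                 break
--     return ownership_map
-- ===== SOURCE B (Python) =====
-- def _get_ownership_map(num_blocks: int, size: int):
--     if size <= 0:
--         return {}
--     return {ndx: ndx % size for ndx in range(num_blocks)}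
-- ===== Notes on version B (the rewrite author's own statement) =====
-- stated objective: faster
-- what changed: B replaces the inner scan over all ranks (modulo tested against each rank until a break) by a single dict comprehension assigning ndx % size directly, with an early empty return when size <= 0.
import Mathlib
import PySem

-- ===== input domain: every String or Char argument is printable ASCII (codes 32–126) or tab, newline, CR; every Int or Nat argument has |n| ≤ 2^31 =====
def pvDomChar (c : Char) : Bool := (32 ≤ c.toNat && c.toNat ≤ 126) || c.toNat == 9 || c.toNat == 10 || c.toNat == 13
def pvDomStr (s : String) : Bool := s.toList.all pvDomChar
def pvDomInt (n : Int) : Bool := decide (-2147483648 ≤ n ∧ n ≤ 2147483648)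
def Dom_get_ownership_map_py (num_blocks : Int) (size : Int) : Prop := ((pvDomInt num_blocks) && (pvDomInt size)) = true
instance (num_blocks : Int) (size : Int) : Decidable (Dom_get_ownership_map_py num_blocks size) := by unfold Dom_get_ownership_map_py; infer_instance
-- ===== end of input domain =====

-- B replaces A's inner rank-scan-with-break by a direct dict comprehension ndx ↦ ndx % size
-- (with an early empty return when size <= 0): O(num_blocks) instead of O(num_blocks*size).

-- ===== PORT A =====
-- inner 'for rank in range(size): if ndx % size == rank: d[ndx] = rank; break'
-- (the range is consumed lazily — Python's range yields ranks one at a time and the loop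
-- breaks — so it is ported as fuel/counter recursion rather than a materialised list)
def aRankLoop (size : Int) (ndx : Int) (d : PySem.Dict Int Int) : Nat → Int → PySem.Dict Int Int
  | 0, _ => d
  | f + 1, r => if PySem.Int.mod ndx size = r then d.insert ndx r else aRankLoop size ndx d f (r + 1)

def get_ownership_map_py (num_blocks : Int) (size : Int) : List (Int × Int) :=
  ((PySem.List.pyRange 0 num_blocks 1).foldl
    (fun d ndx => aRankLoop size ndx d size.toNat 0)
    PySem.Dict.empty).items

-- ===== PORT B =====
def get_ownership_map_py_alt (num_blocks : Int) (size : Int) : List (Int × Int) :=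
  if size ≤ 0 then []
  else
    ((PySem.List.pyRange 0 num_blocks 1).foldl
      (fun d ndx => d.insert ndx (PySem.Int.mod ndx size))
      PySem.Dict.empty).items

-- ===== PRECONDITION & SPEC =====
def Spec_get_ownership_map_py (num_blocks : Int) (size : Int) (out : List (Int × Int)) : Prop := out = get_ownership_map_py_alt num_blocks size
instance (num_blocks : Int) (size : Int) (out : List (Int × Int)) : Decidable (Spec_get_ownership_map_py num_blocks size out) := by unfold Spec_get_ownership_map_py; infer_instance

-- ===== CLAIM (what is proved, stated in full; the proofs are below) =====
def Claim_equal_get_ownership_map_py : Prop := ∀ (num_blocks : Int) (size : Int), Dom_get_ownership_map_py num_blocks size → Spec_get_ownership_map_py num_blocks size (get_ownership_map_py num_blocks size)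

-- ===== LEMMAS AND PROOFS =====

-- A's inner loop inserts (ndx, ndx % size) as soon as the scan reaches ndx % size.
theorem aRankLoop_of_mem (size ndx : Int) (d : PySem.Dict Int Int) (f : Nat) (r : Int)
    (h1 : r ≤ PySem.Int.mod ndx size) (h2 : PySem.Int.mod ndx size < r + f) :
    aRankLoop size ndx d f r = d.insert ndx (PySem.Int.mod ndx size) := by
  induction f generalizing r with
  | zero => omega
  | succ f ih =>
    by_cases hr : PySem.Int.mod ndx size = r
    · simp [aRankLoop, hr]
    · have h1' : r + 1 ≤ PySem.Int.mod ndx size := by omega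
      simp [aRankLoop, hr, ih (r + 1) h1' (by omega)]

theorem get_ownership_map_py_spec : Claim_equal_get_ownership_map_py := by
  intro num_blocks size _
  unfold Spec_get_ownership_map_py get_ownership_map_py get_ownership_map_py_alt
  by_cases hs : size ≤ 0
  · have hz : size.toNat = 0 := by omega
    simp [hs, hz, aRankLoop, PySem.Dict.empty]
  · have hpos : 0 < size := lt_of_not_ge hs
    have hfun : ∀ (l : List Int) (d : PySem.Dict Int Int),
        l.foldl (fun d ndx => aRankLoop size ndx d size.toNat 0) d
          = l.foldl (fun d ndx => d.insert ndx (PySem.Int.mod ndx size)) d := by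
      intro l
      induction l with
      | nil => intro d; rfl
      | cons x xs ih =>
        intro d
        have hlt : PySem.Int.mod x size < 0 + size.toNat := by
          have := PySem.Int.mod_lt x hpos; omega
        rw [List.foldl, List.foldl, aRankLoop_of_mem size x d size.toNat 0 (PySem.Int.mod_nonneg x hpos) hlt, ih]
    simp [hs, hfun]
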